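-- pv_equiv track=rewrite | github.com/Cruise-z/CodeWM_ProWES | 2_Robustness/pythonLang/pyCodeObfuscator/patterns/NL/naming_style_pattern.py | _split_snake
-- ===== SOURCE A (Python) =====
-- from typing import List, Optional
--
-- def _split_snake(name: str) -> Optional[List[str]]:
--     """
--     user_add_num
--     """
--     if "_" not in name:
--         return None
--     if not name[0].isalpha():
--         return None
--     if not all(ch.islower() or ch.isdigit() or ch == "_" for ch in name):
--         return None
--
--     parts = name.split("_")
--     if any(not part for part in parts):
--         return None
--     if any(not p[0].isalpha() for p in parts):
--         return None
--
--     # 统一用小写单词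
--     return [p.lower() for p in parts]
-- ===== SOURCE B (Python) =====
-- from typing import List, Optional
--
-- def _split_snake(name: str) -> Optional[List[str]]:
--     """
--     user_add_num
--     """
--     parts: List[str] = []
--     buf: List[str] = []
--     saw_us = False
--     for ch in name:
--         if ch == "_":
--             if not buf:          # leading, trailing-before-'_' or double underscore
--                 return None
--             parts.append("".join(buf))
--             buf = []
--             saw_us = True
--         elif ch.isdigit():
--             if not buf:          # a part must start with a letter
--                 return None
--             buf.append(ch)
--         elif ch.islower():
--             buf.append(ch)
--         else:
--             return None
--     if not saw_us or not buf:
--         return None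
--     parts.append("".join(buf))
--     return parts
-- ===== Notes on version B (the rewrite author's own statement) =====
-- stated objective: simpler
-- what changed: A's five separate passes over the string (substring membership test, first-char check, a whole-string any-scan, a split on underscores, two scans over the resulting parts plus a lowercasing map) are replaced by one left-to-right character scan that keeps a current-part buffer and a saw-underscore flag and rejects as soon as an illegal character or empty part appears.
import Mathlib
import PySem

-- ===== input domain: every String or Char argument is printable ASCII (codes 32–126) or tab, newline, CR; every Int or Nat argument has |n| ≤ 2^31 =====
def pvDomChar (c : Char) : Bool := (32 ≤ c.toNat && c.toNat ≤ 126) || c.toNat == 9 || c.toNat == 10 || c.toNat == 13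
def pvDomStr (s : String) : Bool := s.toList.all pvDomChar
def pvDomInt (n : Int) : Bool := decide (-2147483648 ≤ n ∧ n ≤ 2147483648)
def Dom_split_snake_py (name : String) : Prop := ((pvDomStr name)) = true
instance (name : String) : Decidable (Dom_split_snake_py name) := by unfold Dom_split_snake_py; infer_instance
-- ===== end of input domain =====

-- B replaces A's five passes over the string (membership test, split, two any-scans,
-- final map) by one left-to-right character scan with a part buffer; objective: simpler.

-- ===== PORT A =====
def split_snake_py (name : String) : Option (List String) :=
  if PySem.Chars.isIn ['_'] name.toList = false then none
  else match PySem.List.pyGet? name.toList 0 with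
    | none => none
    | some c0 =>
      if !PySem.Chars.isalpha c0 then none
      else if !(name.toList.all fun ch => PySem.Chars.islower ch || PySem.Chars.isdigit ch || ch == '_')
        then none
      else
        if (PySem.Chars.splitOn name.toList ['_']).any (fun p => p.isEmpty) then none
        else if (PySem.Chars.splitOn name.toList ['_']).any (fun p => match PySem.List.pyGet? p 0 with
              | none => true
              | some c => !PySem.Chars.isalpha c) then none
        else some ((PySem.Chars.splitOn name.toList ['_']).map fun p => String.ofList (PySem.Chars.lower p))

-- ===== PORT B =====
def pvScanB : List Char → List String → List Char → Bool → Option (List String)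
  | [], parts, buf, sawUs =>
      if !sawUs || buf.isEmpty then none
      else some (parts ++ [String.ofList buf])
  | ch :: rest, parts, buf, sawUs =>
      if ch == '_' then
        if buf.isEmpty then none
        else pvScanB rest (parts ++ [String.ofList buf]) [] true
      else if PySem.Chars.isdigit ch then
        if buf.isEmpty then none
        else pvScanB rest parts (buf ++ [ch]) sawUs
      else if PySem.Chars.islower ch then pvScanB rest parts (buf ++ [ch]) sawUs
      else none

def split_snake_py_alt (name : String) : Option (List String) :=
  pvScanB name.toList [] [] false

-- ===== PRECONDITION & SPEC =====
def Spec_split_snake_py (name : String) (out : Option (List String)) : Prop := out = split_snake_py_alt name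
instance (name : String) (out : Option (List String)) : Decidable (Spec_split_snake_py name out) := by unfold Spec_split_snake_py; infer_instance

-- ===== CLAIM (what is proved, stated in full; the proofs are below) =====
def Claim_equal_split_snake_py : Prop := ∀ (name : String), Dom_split_snake_py name → Spec_split_snake_py name (split_snake_py name)

-- ===== LEMMAS AND PROOFS =====
def pvSp (sep : Char) : List Char → List (List Char)
  | [] => [[]]
  | c :: cs => if c == sep then [] :: pvSp sep cs else (pvSp sep cs).modifyHead (c :: ·)

def pvOk (c : Char) : Bool := PySem.Chars.islower c || PySem.Chars.isdigit c

def pvGood : List Char → Bool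
  | [] => false
  | c :: r => PySem.Chars.islower c && r.all pvOk

theorem pvSp_ne_nil (sep : Char) (l : List Char) : pvSp sep l ≠ [] := by
  cases l with
  | nil => simp [pvSp]
  | cons c cs =>
    simp only [pvSp]
    split
    · simp
    · cases hs : pvSp sep cs with
      | nil => exact absurd hs (pvSp_ne_nil sep cs)
      | cons a t => simp

theorem pvSp_append_no_sep (sep : Char) (l m : List Char) (h : ∀ c ∈ l, c ≠ sep) :
    pvSp sep (l ++ m) = (pvSp sep m).modifyHead (l ++ ·) := by
  induction l with
  | nil => cases hm : pvSp sep m with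
    | nil => exact absurd hm (pvSp_ne_nil sep m)
    | cons a t => simp [hm]
  | cons c cs ih =>
    have hc : c ≠ sep := h c (by simp)
    simp only [List.cons_append, pvSp, beq_iff_eq, if_neg hc,
      ih (fun x hx => h x (by simp [hx]))]
    cases hm : pvSp sep m with
    | nil => exact absurd hm (pvSp_ne_nil sep m)
    | cons a t => simp

theorem pvDigit_not_lower (c : Char) (h : PySem.Chars.isdigit c = true) : PySem.Chars.islower c = false := by
  simp [PySem.Chars.isdigit, PySem.Chars.islower, Char.le_def, UInt32.le_iff_toNat_le] at *
  omega

theorem pvOk_ne_us (c : Char) (h : pvOk c = true) : c ≠ '_' := by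
  rintro rfl; simp [pvOk, PySem.Chars.isdigit, PySem.Chars.islower] at h

theorem pvGood_all_ok (p : List Char) (h : pvGood p = true) : p.all pvOk = true := by
  cases p with
  | nil => simp
  | cons c r =>
    simp only [pvGood, Bool.and_eq_true] at h
    simp [List.all_cons, h.2, pvOk, h.1]

theorem pvSp_buf (buf m : List Char) (h : buf = [] ∨ pvGood buf = true) :
    pvSp '_' (buf ++ m) = (pvSp '_' m).modifyHead (buf ++ ·) := by
  apply pvSp_append_no_sep
  intro c hc
  rcases h with h | h
  · subst h; simp at hc
  · exact pvOk_ne_us c (List.all_eq_true.mp (pvGood_all_ok buf h) c hc)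

theorem pvScanB_eq (cs : List Char) : ∀ (parts : List String) (buf : List Char) (saw : Bool),
    (buf = [] ∨ pvGood buf = true) →
    pvScanB cs parts buf saw =
      (if ((saw || cs.contains '_') && (pvSp '_' (buf ++ cs)).all pvGood) = true then
        some (parts ++ (pvSp '_' (buf ++ cs)).map String.ofList)
      else none) := by
  induction cs with
  | nil =>
    intro parts buf saw hbuf
    have hsp : pvSp '_' (buf ++ []) = (pvSp '_' []).modifyHead (buf ++ ·) := pvSp_buf buf [] hbuf
    simp only [pvSp, List.modifyHead, List.append_nil] at hsp
    rw [List.append_nil, hsp]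
    cases buf with
    | nil => simp [pvScanB, pvGood]
    | cons b br =>
      rcases hbuf with h | h
      · exact absurd h (by simp)
      · cases saw with
        | false => simp [pvScanB]
        | true => simp [pvScanB, h]
  | cons c rest ih =>
    intro parts buf saw hbuf
    by_cases hc : c = '_'
    · subst hc
      cases buf with
      | nil =>
        have hsp : pvSp '_' ('_' :: rest) = [] :: pvSp '_' rest := by simp [pvSp]
        simp [pvScanB, hsp, pvGood]
      | cons b br =>
        rcases hbuf with h | h
        · exact absurd h (by simp)
        · have hsp : pvSp '_' ((b :: br) ++ '_' :: rest) = (b :: br) :: pvSp '_' rest := by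
            rw [pvSp_buf (b :: br) ('_' :: rest) (Or.inr h)]
            simp [pvSp]
          rw [show pvScanB ('_' :: rest) parts (b :: br) saw
                = pvScanB rest (parts ++ [String.ofList (b :: br)]) [] true by
              simp [pvScanB]]
          rw [ih (parts ++ [String.ofList (b :: br)]) [] true (Or.inl rfl), hsp]
          simp [h]
    · have hcont : (c :: rest).contains '_' = rest.contains '_' := by
        simp [Ne.symm hc]
      by_cases hd : PySem.Chars.isdigit c = true
      · cases buf with
        | nil =>
          have hsp : ∃ h t, pvSp '_' ([] ++ c :: rest) = (c :: h) :: t := by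
            cases hs : pvSp '_' rest with
            | nil => exact absurd hs (pvSp_ne_nil '_' rest)
            | cons a t => exact ⟨a, t, by simp [pvSp, hc, hs]⟩
          obtain ⟨h, t, hsp⟩ := hsp
          rw [hsp]
          have hng : pvGood (c :: h) = false := by
            simp [pvGood, pvDigit_not_lower c hd]
          simp [pvScanB, hc, hd, hng]
        | cons b br =>
          rcases hbuf with hb | hb
          · exact absurd hb (by simp)
          · rw [show pvScanB (c :: rest) parts (b :: br) saw
                  = pvScanB rest parts ((b :: br) ++ [c]) saw by
                simp [pvScanB, hc, hd]]
            have hgood : pvGood ((b :: br) ++ [c]) = true := by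
              simp only [pvGood, Bool.and_eq_true] at hb
              simp only [List.cons_append, pvGood, List.all_append, Bool.and_eq_true]
              exact ⟨hb.1, by simp [hb.2], by simp [pvOk, hd]⟩
            rw [ih parts ((b :: br) ++ [c]) saw (Or.inr hgood)]
            simp only [List.append_assoc, List.cons_append, List.nil_append, hcont]
      · by_cases hl : PySem.Chars.islower c = true
        · rw [show pvScanB (c :: rest) parts buf saw
                = pvScanB rest parts (buf ++ [c]) saw by
              cases buf <;> simp [pvScanB, hc, hd, hl]]
          have hgood : pvGood (buf ++ [c]) = true := by
            rcases hbuf with hb | hb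
            · subst hb; simp [pvGood, hl]
            · cases buf with
              | nil => simp [pvGood, hl]
              | cons b br =>
                simp only [pvGood, Bool.and_eq_true] at hb
                simp only [List.cons_append, pvGood, List.all_append, Bool.and_eq_true]
                exact ⟨hb.1, by simp [hb.2], by simp [pvOk, hl]⟩
          rw [ih parts (buf ++ [c]) saw (Or.inr hgood)]
          simp only [List.append_assoc, List.cons_append, List.nil_append, hcont]
        · have hscan : pvScanB (c :: rest) parts buf saw = none := by
            cases buf <;> simp [pvScanB, hc, hd, hl]
          rw [hscan]
          have hsp0 : ∃ h t, pvSp '_' (c :: rest) = (c :: h) :: t := by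
            cases hs : pvSp '_' rest with
            | nil => exact absurd hs (pvSp_ne_nil '_' rest)
            | cons a t => exact ⟨a, t, by simp [pvSp, hc, hs]⟩
          obtain ⟨h, t, hsp0⟩ := hsp0
          have hsp : pvSp '_' (buf ++ c :: rest) = (buf ++ c :: h) :: t := by
            rw [pvSp_buf buf (c :: rest) hbuf, hsp0]; simp
          rw [hsp]
          have hbad : pvGood (buf ++ c :: h) = false := by
            cases buf with
            | nil => simp [pvGood, hl]
            | cons b br =>
              simp only [List.cons_append, pvGood]
              have hok : pvOk c = false := by simp [pvOk, hl, hd]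
              simp [List.all_append, hok]
          simp [hbad]

theorem pvSplitOn_go_eq (fuel : Nat) (l cur : List Char) (acc : List (List Char)) :
    l.length ≤ fuel →
    PySem.Chars.splitOn.go ['_'] fuel l cur acc
      = acc.reverse ++ (pvSp '_' l).modifyHead (cur.reverse ++ ·) := by
  induction fuel generalizing l cur acc with
  | zero =>
    intro hl
    have : l = [] := List.length_eq_zero_iff.mp (Nat.le_zero.mp hl)
    subst this
    simp [PySem.Chars.splitOn.go, pvSp]
  | succ fuel ih =>
    intro hl
    cases l with
    | nil => simp [PySem.Chars.splitOn.go, pvSp]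
    | cons c rest =>
      by_cases hc : c = '_'
      · subst hc
        rw [show PySem.Chars.splitOn.go ['_'] (fuel+1) ('_'::rest) cur acc
              = PySem.Chars.splitOn.go ['_'] fuel rest [] (cur.reverse :: acc) by
            simp [PySem.Chars.splitOn.go, List.isPrefixOf]]
        rw [ih rest [] (cur.reverse :: acc) (by simpa using Nat.le_of_succ_le_succ hl)]
        cases hs : pvSp '_' rest with
        | nil => exact absurd hs (pvSp_ne_nil '_' rest)
        | cons a t => simp [pvSp, hs]
      · rw [show PySem.Chars.splitOn.go ['_'] (fuel+1) (c::rest) cur acc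
              = PySem.Chars.splitOn.go ['_'] fuel rest (c :: cur) acc by
            simp [PySem.Chars.splitOn.go, List.isPrefixOf, Ne.symm hc]]
        rw [ih rest (c :: cur) acc (by simpa using Nat.le_of_succ_le_succ hl)]
        cases hs : pvSp '_' rest with
        | nil => exact absurd hs (pvSp_ne_nil '_' rest)
        | cons a t => simp [pvSp, hs, hc]

theorem pvSplitOn_eq_sp (cs : List Char) :
    PySem.Chars.splitOn cs ['_'] = pvSp '_' cs := by
  have h := pvSplitOn_go_eq (cs.length + 1) cs [] [] (by omega)
  have h2 : (pvSp '_' cs).modifyHead (fun x => x) = pvSp '_' cs := by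
    cases pvSp '_' cs <;> simp
  simpa [PySem.Chars.splitOn, h2] using h

theorem pvIsIn_singleton (a : Char) (cs : List Char) :
    PySem.Chars.isIn [a] cs = cs.contains a := by
  by_cases h : a ∈ cs
  · have hinf : [a] <:+: cs := by
      obtain ⟨s, t, rfl⟩ := List.append_of_mem h
      exact ⟨s, t, by simp⟩
    simp [(PySem.Chars.isIn_iff_infix _ _).mpr hinf, h]
  · have : PySem.Chars.isIn [a] cs = false := by
      apply (PySem.Chars.isIn_eq_false_iff _ _).mpr
      intro hinf
      exact h (hinf.subset (by simp))
    simp [this, h]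

theorem pvDigit_not_alpha (c : Char) (h : PySem.Chars.isdigit c = true) :
    PySem.Chars.isalpha c = false := by
  simp [PySem.Chars.isdigit, PySem.Chars.isalpha, PySem.Chars.isupper, PySem.Chars.islower,
    Char.le_def, UInt32.le_iff_toNat_le] at *
  omega

theorem pvOk_alpha_lower (c : Char) (h1 : pvOk c = true) (h2 : PySem.Chars.isalpha c = true) :
    PySem.Chars.islower c = true := by
  rcases Bool.or_eq_true_iff.mp h1 with h | h
  · exact h
  · rw [pvDigit_not_alpha c h] at h2; exact absurd h2 (by simp)

theorem pvOk_not_upper (c : Char) (h : pvOk c = true) : PySem.Chars.isupper c = false := by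
  simp [pvOk, PySem.Chars.isdigit, PySem.Chars.islower] at h
  simp [PySem.Chars.isupper, Char.le_def, UInt32.le_iff_toNat_le] at *
  omega

theorem pvAllOk_iff (cs : List Char) :
    (cs.all fun ch => PySem.Chars.islower ch || PySem.Chars.isdigit ch || ch == '_')
      = (pvSp '_' cs).all (fun p => p.all pvOk) := by
  induction cs with
  | nil => simp [pvSp]
  | cons c cs ih =>
    by_cases hc : c = '_'
    · subst hc; simp [pvSp, ih]
    · cases hs : pvSp '_' cs with
      | nil => exact absurd hs (pvSp_ne_nil '_' cs)
      | cons a t =>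
        rw [hs] at ih
        simp only [List.all_cons, pvSp, beq_iff_eq, if_neg hc, hs, List.modifyHead, ih]
        have hb : (c == '_') = false := by simp [hc]
        simp [pvOk, hb, Bool.and_assoc]

theorem pvLower_good (p : List Char) (h : pvGood p = true) :
    PySem.Chars.lower p = p := by
  have hall : ∀ c ∈ p, PySem.Chars.isupper c = false := by
    intro c hc
    exact pvOk_not_upper c (List.all_eq_true.mp (pvGood_all_ok p h) c hc)
  show p.map PySem.Chars.lowerChar = p
  conv_rhs => rw [← List.map_id p]
  apply List.map_congr_left
  intro c hc
  simp [PySem.Chars.lowerChar, hall c hc]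

theorem pvGood_parts (parts : List (List Char)) (h : parts.all pvGood = true) :
    parts.all (fun p => p.all pvOk) = true := by
  rw [List.all_eq_true] at h ⊢
  exact fun p hp => pvGood_all_ok p (h p hp)

theorem pvMain (name : String) : split_snake_py name = split_snake_py_alt name := by
  unfold split_snake_py split_snake_py_alt
  have hB := pvScanB_eq name.toList [] [] false (Or.inl rfl)
  simp only [List.nil_append, Bool.false_or, List.map_map] at hB
  rw [hB]
  rw [pvIsIn_singleton]
  by_cases hmem : name.toList.contains '_'
  · cases hcs : name.toList with
    | nil => rw [hcs] at hmem; simp at hmem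
    | cons c0 cs' =>
      rw [hcs] at hmem
      have hget : PySem.List.pyGet? (c0 :: cs') (0 : Int) = some c0 := by
        rw [show (0 : Int) = ((0 : Nat) : Int) by simp, PySem.List.pyGet?_natCast]
        rfl
      simp only [hmem, hget, pvSplitOn_eq_sp]
      by_cases G : (pvSp '_' (c0 :: cs')).all pvGood = true
      · -- success on both sides
        have hc0 : c0 ≠ '_' := by
          intro h0
          rw [h0] at G
          simp [pvSp, pvGood] at G
        obtain ⟨a, t, hs⟩ : ∃ a t, pvSp '_' cs' = a :: t := by
          cases hx : pvSp '_' cs' with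
          | nil => exact absurd hx (pvSp_ne_nil '_' cs')
          | cons a t => exact ⟨a, t, rfl⟩
        have hsp : pvSp '_' (c0 :: cs') = (c0 :: a) :: t := by
          simp [pvSp, hc0, hs]
        have hg0 : pvGood (c0 :: a) = true := by
          rw [hsp, List.all_cons, Bool.and_eq_true] at G
          exact G.1
        have hl0 : PySem.Chars.islower c0 = true := by
          simp only [pvGood, Bool.and_eq_true] at hg0
          exact hg0.1
        have ha0 : PySem.Chars.isalpha c0 = true := by
          simp [PySem.Chars.isalpha, hl0]
        have hall : ((c0 :: cs').all fun ch =>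
            PySem.Chars.islower ch || PySem.Chars.isdigit ch || ch == '_') = true := by
          rw [pvAllOk_iff]
          exact pvGood_parts _ G
        have hemp : ((pvSp '_' (c0 :: cs')).any fun p => p.isEmpty) = false := by
          rw [List.any_eq_false]
          intro p hp
          have := List.all_eq_true.mp G p hp
          cases p with
          | nil => simp [pvGood] at this
          | cons x r => simp
        have hhd : ((pvSp '_' (c0 :: cs')).any fun p =>
            match PySem.List.pyGet? p (0 : Int) with
            | none => true
            | some c => !PySem.Chars.isalpha c) = false := by
          rw [List.any_eq_false]
          intro p hp
          have hg := List.all_eq_true.mp G p hp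
          cases p with
          | nil => simp [pvGood] at hg
          | cons x r =>
            have hx : PySem.Chars.islower x = true := by
              simp only [pvGood, Bool.and_eq_true] at hg
              exact hg.1
            have : PySem.List.pyGet? (x :: r) (0 : Int) = some x := by
              rw [show (0 : Int) = ((0 : Nat) : Int) by simp, PySem.List.pyGet?_natCast]
              rfl
            simp [this, PySem.Chars.isalpha, hx]
        simp only [ha0, hall, hemp, hhd, G, Bool.not_true, Bool.false_eq_true, if_false,
          Bool.true_and, if_true, Bool.and_self]
        have : ∀ p ∈ pvSp '_' (c0 :: cs'),
            String.ofList (PySem.Chars.lower p) = String.ofList p := by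
          intro p hp
          rw [pvLower_good p (List.all_eq_true.mp G p hp)]
        simp [List.map_congr_left this]
      · -- B rejects; show A rejects too
        have hGf : (pvSp '_' (c0 :: cs')).all pvGood = false := by
          simpa using G
        simp only [hGf, Bool.and_false, Bool.false_eq_true, if_false]
        by_cases ha : PySem.Chars.isalpha c0 = true
        · by_cases hall : ((c0 :: cs').all fun ch =>
              PySem.Chars.islower ch || PySem.Chars.isdigit ch || ch == '_') = true
          · by_cases hemp : ((pvSp '_' (c0 :: cs')).any fun p => p.isEmpty) = true
            · simp [ha, hall, hemp]
            · by_cases hhd : ((pvSp '_' (c0 :: cs')).any fun p =>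
                  match PySem.List.pyGet? p (0 : Int) with
                  | none => true
                  | some c => !PySem.Chars.isalpha c) = true
              · simp [ha, hall, hemp, hhd]
              · exfalso
                apply G
                rw [List.all_eq_true]
                intro p hp
                have hpok : p.all pvOk = true := by
                  have hiff := pvAllOk_iff (c0 :: cs')
                  rw [hiff] at hall
                  exact List.all_eq_true.mp hall p hp
                have hemp' := List.any_eq_false.mp (eq_false_of_ne_true hemp) p hp
                cases p with
                | nil => simp at hemp'
                | cons x r =>
                  have hget2 : PySem.List.pyGet? (x :: r) (0 : Int) = some x := by
                    rw [show (0 : Int) = ((0 : Nat) : Int) by simp, PySem.List.pyGet?_natCast]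
                    rfl
                  have hhd' := List.any_eq_false.mp (eq_false_of_ne_true hhd) (x :: r) hp
                  rw [hget2] at hhd'
                  have hax : PySem.Chars.isalpha x = true := by simpa using hhd'
                  have hox : pvOk x = true := by
                    simp only [List.all_cons, Bool.and_eq_true] at hpok
                    exact hpok.1
                  simp only [pvGood, Bool.and_eq_true]
                  refine ⟨pvOk_alpha_lower x hox hax, ?_⟩
                  simp only [List.all_cons, Bool.and_eq_true] at hpok
                  exact hpok.2
          · simp [ha, hall]
        · simp [ha]
  · have h1 : name.toList.contains '_' = false := eq_false_of_ne_true hmem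
    rw [h1]
    simp

-- ===== VERDICT (by name: the statement is the Claim_ definition above) =====
theorem split_snake_py_spec : Claim_equal_split_snake_py := by
  intro name _
  unfold Spec_split_snake_py
  exact pvMain name
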